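-- pv_equiv track=rewrite | github.com/MC-and-his-Agents/Syvert | scripts/item_context.py | strip_fenced_code_blocks
-- ===== SOURCE A (Python) =====
-- def strip_fenced_code_blocks(text: str) -> str:
--     cleaned: list[str] = []
--     in_fence = False
--     fence_char = ""
--     fence_len = 0
--
--     for line in text.splitlines(keepends=True):
--         stripped = line.lstrip()
--         if not in_fence:
--             if stripped and stripped[0] in {"`", "~"}:
--                 marker_len = 0
--                 for char in stripped:
--                     if char == stripped[0]:
--                         marker_len += 1
--                         continue
--                     break
--                 if marker_len >= 3:
--                     in_fence = True
--                     fence_char = stripped[0]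
--                     fence_len = marker_len
--                     continue
--             cleaned.append(line)
--             continue
--
--         closing = stripped.strip()
--         if closing and len(closing) >= fence_len and all(char == fence_char for char in closing):
--             in_fence = False
--
--     return "".join(cleaned)
-- ===== SOURCE B (Python) =====
-- def strip_fenced_code_blocks(text: str) -> str:
--     def opener(line):
--         s = line.lstrip()
--         if s and s[0] in "`~":
--             run = len(s) - len(s.lstrip(s[0]))
--             if run >= 3:
--                 return (s[0], run)
--         return None
--
--     def split_at_opener(lines):
--         """(verbatim prefix, fence info of first opener or None, lines after the opener)."""
--         for i, line in enumerate(lines):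
--             f = opener(line)
--             if f is not None:
--                 return lines[:i], f, lines[i + 1:]
--         return lines, None, []
--
--     def drop_block(lines, ch, run):
--         """Lines after the closing fence ([] if the block is unterminated)."""
--         for i, line in enumerate(lines):
--             c = line.strip()
--             if c and len(c) >= run and set(c) == {ch}:
--                 return lines[i + 1:]
--         return []
--
--     def go(lines):
--         prefix, fence, rest = split_at_opener(lines)
--         if fence is None:
--             return prefix
--         ch, run = fence
--         return prefix + go(drop_block(rest, ch, run))
--
--     return "".join(go(text.splitlines(keepends=True)))
-- ===== Notes on version B (the rewrite author's own statement) =====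
-- stated objective: alternative
-- what changed: B replaces A's per-line boolean state machine by a recursive segment decomposition: a search helper splits the line list at the first fence opener, another search drops the block up to its closer (closer test via set equality), and the kept segments are concatenated by recursion on the remaining suffix.
import Mathlib
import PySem

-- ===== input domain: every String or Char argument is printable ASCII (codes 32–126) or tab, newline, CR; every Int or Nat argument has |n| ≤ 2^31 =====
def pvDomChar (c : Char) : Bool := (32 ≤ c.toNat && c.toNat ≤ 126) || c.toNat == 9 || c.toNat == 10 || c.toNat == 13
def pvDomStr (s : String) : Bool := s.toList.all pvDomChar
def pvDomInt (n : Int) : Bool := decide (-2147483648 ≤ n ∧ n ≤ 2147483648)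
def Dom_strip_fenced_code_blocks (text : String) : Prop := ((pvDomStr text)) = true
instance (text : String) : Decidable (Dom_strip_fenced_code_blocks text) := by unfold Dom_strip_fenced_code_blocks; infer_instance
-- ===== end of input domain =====

-- B replaces A's per-line boolean state machine by a recursive segment
-- decomposition (find first opener / drop block / recurse); alternative, same cost.

-- ===== PORT A =====

-- text.splitlines(keepends=True); exact on Dom, where the only line breaks are
-- '\n', '\r' and '\r\n' (Python's extra break characters lie outside Dom).
def pvSplitKeepGo : List Char → List Char → List (List Char)
  | [], cur => if cur = [] then [] else [cur.reverse]
  | '\r' :: '\n' :: rest, cur => (cur.reverse ++ ['\r', '\n']) :: pvSplitKeepGo rest []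
  | c :: rest, cur =>
      if c = '\n' ∨ c = '\r' then (cur.reverse ++ [c]) :: pvSplitKeepGo rest []
      else pvSplitKeepGo rest (c :: cur)

def pvSplitKeep (cs : List Char) : List (List Char) := pvSplitKeepGo cs []

-- A's inner 'for char in stripped: … continue/break' counting the leading run
def pvRunLen (c : Char) : List Char → Nat
  | [] => 0
  | x :: xs => if x = c then pvRunLen c xs + 1 else 0

-- loop state: (cleaned, in_fence, fence_char, fence_len); fence_char starts as
-- Python's "" — unused while in_fence is false, ported as the dummy ' '
def pvStepA : (List (List Char) × Bool × Char × Nat) → List Char →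
    List (List Char) × Bool × Char × Nat
  | (cleaned, false, fence_char, fence_len), line =>
    let stripped := PySem.Chars.lstrip line
    match stripped with
    | [] => (cleaned ++ [line], false, fence_char, fence_len)
    | c :: _ =>
      if c = '`' ∨ c = '~' then
        let marker_len := pvRunLen c stripped
        if 3 ≤ marker_len then (cleaned, true, c, marker_len)
        else (cleaned ++ [line], false, fence_char, fence_len)
      else (cleaned ++ [line], false, fence_char, fence_len)
  | (cleaned, true, fence_char, fence_len), line =>
    let closing := PySem.Chars.strip (PySem.Chars.lstrip line)
    if closing ≠ [] ∧ fence_len ≤ closing.length ∧ closing.all (· == fence_char) then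
      (cleaned, false, fence_char, fence_len)
    else (cleaned, true, fence_char, fence_len)

def strip_fenced_code_blocks (text : String) : String :=
  String.ofList ((((pvSplitKeep text.toList).foldl pvStepA ([], false, ' ', 0)).1).flatten)

-- ===== PORT B =====

-- Source B's opener(line): fence char and run length of an opening fence, if any
-- (run = len(s) - len(s.lstrip(ch)) is ported as length minus dropWhile length)
def pvOpener (l : List Char) : Option (Char × Nat) :=
  match PySem.Chars.lstrip l with
  | [] => none
  | c :: rest =>
    if c = '`' ∨ c = '~' then
      let run := (c :: rest).length - (List.dropWhile (· == c) (c :: rest)).length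
      if 3 ≤ run then some (c, run) else none
    else none

-- Source B's split_at_opener: verbatim prefix, first fence, lines after the opener
def pvSplitAtOpener : List (List Char) → List (List Char) × Option (Char × Nat) × List (List Char)
  | [] => ([], none, [])
  | l :: ls =>
    match pvOpener l with
    | some f => ([], some f, ls)
    | none =>
      let r := pvSplitAtOpener ls
      (l :: r.1, r.2.1, r.2.2)

-- Source B's drop_block: lines after the closing fence; set(c) == {ch} is ported
-- as PySem.Set.equal on PySem.Set.ofList (Python set equality)
def pvDropBlock (ch : Char) (run : Nat) : List (List Char) → List (List Char)
  | [] => []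
  | l :: ls =>
    let c := PySem.Chars.strip l
    if c ≠ [] ∧ run ≤ c.length ∧ PySem.Set.equal (PySem.Set.ofList c) (PySem.Set.ofList [ch]) then ls
    else pvDropBlock ch run ls

theorem pvDropBlock_length_le (ch : Char) (run : Nat) :
    ∀ ls : List (List Char), (pvDropBlock ch run ls).length ≤ ls.length := by
  intro ls
  induction ls with
  | nil => simp [pvDropBlock]
  | cons l ls ih =>
      simp only [pvDropBlock]
      split
      · simp
      · exact Nat.le_succ_of_le ih

theorem pvSplit_rest_lt :
    ∀ (lines p : List (List Char)) (f : Char × Nat) (rest : List (List Char)),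
      pvSplitAtOpener lines = (p, some f, rest) → rest.length < lines.length := by
  intro lines
  induction lines with
  | nil => intro p f rest h; simp [pvSplitAtOpener] at h
  | cons l ls ih =>
      intro p f rest h
      simp only [pvSplitAtOpener] at h
      cases ho : pvOpener l with
      | some g =>
          rw [ho] at h
          simp only [Prod.mk.injEq] at h
          obtain ⟨-, -, hr⟩ := h
          subst hr; simp
      | none =>
          rw [ho] at h
          simp only [Prod.mk.injEq] at h
          obtain ⟨-, h2, hr⟩ := h
          have := ih _ _ _ (by
            rw [show pvSplitAtOpener ls
              = ((pvSplitAtOpener ls).1, (pvSplitAtOpener ls).2.1, (pvSplitAtOpener ls).2.2) from rfl,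
              h2, hr])
          simpa using Nat.lt_succ_of_lt this

-- Source B's go: emit the kept prefix, recurse past the dropped block
def pvGo (lines : List (List Char)) : List (List Char) :=
  match hs : pvSplitAtOpener lines with
  | (p, none, _) => p
  | (p, some (ch, run), rest) => p ++ pvGo (pvDropBlock ch run rest)
termination_by lines.length
decreasing_by
  exact Nat.lt_of_le_of_lt (pvDropBlock_length_le _ _ _) (pvSplit_rest_lt _ _ _ _ hs)

def strip_fenced_code_blocks_alt (text : String) : String :=
  String.ofList ((pvGo (pvSplitKeep text.toList)).flatten)

-- ===== PRECONDITION & SPEC =====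
def Spec_strip_fenced_code_blocks (text : String) (out : String) : Prop := out = strip_fenced_code_blocks_alt text
instance (text : String) (out : String) : Decidable (Spec_strip_fenced_code_blocks text out) := by unfold Spec_strip_fenced_code_blocks; infer_instance

-- ===== CLAIM =====
def Claim_equal_strip_fenced_code_blocks : Prop := ∀ (text : String), Dom_strip_fenced_code_blocks text → Spec_strip_fenced_code_blocks text (strip_fenced_code_blocks text)

-- ===== LEMMAS AND PROOFS =====

-- B's lstrip-arithmetic run length equals A's counting loop
theorem pvRunLen_eq_takeWhile (c : Char) (s : List Char) :
    pvRunLen c s = (s.takeWhile (· == c)).length := by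
  induction s with
  | nil => rfl
  | cons x xs ih =>
      by_cases h : x = c <;> simp [pvRunLen, h, ih]

theorem pvRunLen_eq_sub (c : Char) (s : List Char) :
    pvRunLen c s = s.length - (s.dropWhile (· == c)).length := by
  rw [pvRunLen_eq_takeWhile]
  have h := congrArg List.length (List.takeWhile_append_dropWhile (p := (· == c)) (l := s))
  simp only [List.length_append] at h
  omega

theorem dropWhile_idem {α : Type} (p : α → Bool) (l : List α) :
    List.dropWhile p (List.dropWhile p l) = List.dropWhile p l := by
  induction l with
  | nil => rfl
  | cons x xs ih =>
      by_cases h : p x <;> simp [List.dropWhile, h, ih]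

-- A strips the already-lstripped line; B strips the raw line: the same value
theorem strip_lstrip (l : List Char) :
    PySem.Chars.strip (PySem.Chars.lstrip l) = PySem.Chars.strip l := by
  simp [PySem.Chars.strip, PySem.Chars.lstrip, dropWhile_idem]

-- B's set-equality closer test agrees with A's all-chars test on nonempty input
theorem set_equal_iff_all (c : List Char) (ch : Char) (hne : c ≠ []) :
    (PySem.Set.equal (PySem.Set.ofList c) (PySem.Set.ofList [ch]) = true)
      ↔ (c.all (· == ch) = true) := by
  rw [PySem.Set.equal_iff]
  simp only [PySem.Set.mem_ofList, List.all_eq_true, List.mem_singleton, beq_iff_eq]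
  constructor
  · intro h x hx; exact (h x).1 hx
  · intro h x
    constructor
    · intro hx; exact h x hx
    · intro hx
      subst hx
      cases c with
      | nil => exact absurd rfl hne
      | cons y ys => have := h y (by simp); rw [← this]; simp

-- the two closer conditions coincide
theorem closer_cond_iff (l : List Char) (ch : Char) (run : Nat) :
    ((PySem.Chars.strip l ≠ [] ∧ run ≤ (PySem.Chars.strip l).length ∧
        PySem.Set.equal (PySem.Set.ofList (PySem.Chars.strip l)) (PySem.Set.ofList [ch]))
      ↔ (PySem.Chars.strip l ≠ [] ∧ run ≤ (PySem.Chars.strip l).length ∧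
        (PySem.Chars.strip l).all (· == ch))) := by
  constructor
  · rintro ⟨h1, h2, h3⟩; exact ⟨h1, h2, (set_equal_iff_all _ _ h1).1 h3⟩
  · rintro ⟨h1, h2, h3⟩; exact ⟨h1, h2, (set_equal_iff_all _ _ h1).2 h3⟩

-- pvOpener characterized by A's branch conditions
theorem pvOpener_nil (l : List Char) (h : PySem.Chars.lstrip l = []) :
    pvOpener l = none := by simp [pvOpener, h]

theorem pvOpener_some (l : List Char) (c : Char) (rest : List Char)
    (h : PySem.Chars.lstrip l = c :: rest) (hc : c = '`' ∨ c = '~')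
    (hm : 3 ≤ pvRunLen c (c :: rest)) :
    pvOpener l = some (c, pvRunLen c (c :: rest)) := by
  have hm' : 3 ≤ (c :: rest).length - (List.dropWhile (· == c) (c :: rest)).length := by
    rw [← pvRunLen_eq_sub]; exact hm
  simp only [pvOpener, h]
  rw [if_pos hc, if_pos hm', ← pvRunLen_eq_sub]

theorem pvOpener_none (l : List Char) (c : Char) (rest : List Char)
    (h : PySem.Chars.lstrip l = c :: rest)
    (hn : ¬((c = '`' ∨ c = '~') ∧ 3 ≤ pvRunLen c (c :: rest))) :
    pvOpener l = none := by
  simp only [pvOpener, h]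
  by_cases hc : c = '`' ∨ c = '~'
  · rw [if_pos hc]
    have hm : ¬ 3 ≤ (c :: rest).length - (List.dropWhile (· == c) (c :: rest)).length := by
      rw [← pvRunLen_eq_sub]; exact fun hm => hn ⟨hc, hm⟩
    rw [if_neg hm]
  · rw [if_neg hc]

-- unfolding equation for pvGo
theorem pvGo_eq (lines : List (List Char)) :
    pvGo lines =
      match pvSplitAtOpener lines with
      | (p, none, _) => p
      | (p, some (ch, run), rest) => p ++ pvGo (pvDropBlock ch run rest) := by
  rw [pvGo]
  split <;> simp_all

theorem pvGo_cons_none (l : List Char) (ls : List (List Char)) (h : pvOpener l = none) :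
    pvGo (l :: ls) = l :: pvGo ls := by
  rw [pvGo_eq (l :: ls), pvGo_eq ls]
  simp only [pvSplitAtOpener, h]
  rcases hs : pvSplitAtOpener ls with ⟨p, f, rest⟩
  cases f with
  | none => simp
  | some g => rcases g with ⟨ch, run⟩; simp

theorem pvGo_cons_some (l : List Char) (ls : List (List Char)) (ch : Char) (run : Nat)
    (h : pvOpener l = some (ch, run)) :
    pvGo (l :: ls) = pvGo (pvDropBlock ch run ls) := by
  rw [pvGo_eq (l :: ls)]
  simp only [pvSplitAtOpener, h]
  simp

theorem pvDropBlock_cons_pos (ch : Char) (run : Nat) (l : List Char) (ls : List (List Char))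
    (h : PySem.Chars.strip l ≠ [] ∧ run ≤ (PySem.Chars.strip l).length ∧
      (PySem.Chars.strip l).all (· == ch)) :
    pvDropBlock ch run (l :: ls) = ls := by
  simp only [pvDropBlock]
  rw [if_pos ((closer_cond_iff l ch run).2 h)]

theorem pvDropBlock_cons_neg (ch : Char) (run : Nat) (l : List Char) (ls : List (List Char))
    (h : ¬(PySem.Chars.strip l ≠ [] ∧ run ≤ (PySem.Chars.strip l).length ∧
      (PySem.Chars.strip l).all (· == ch))) :
    pvDropBlock ch run (l :: ls) = pvDropBlock ch run ls := by
  simp only [pvDropBlock]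
  rw [if_neg (fun hb => h ((closer_cond_iff l ch run).1 hb))]

-- the loop invariant relating A's state machine to B's segment recursion
theorem pvFold_eq_go :
    ∀ (lines : List (List Char)) (acc : List (List Char)) (inf : Bool) (fc : Char) (fl : Nat),
      (lines.foldl pvStepA (acc, inf, fc, fl)).1
        = acc ++ (if inf then pvGo (pvDropBlock fc fl lines) else pvGo lines) := by
  intro lines
  induction lines with
  | nil =>
      intro acc inf fc fl
      cases inf <;> simp [pvDropBlock, pvGo_eq, pvSplitAtOpener]
  | cons l ls ih =>
      intro acc inf fc fl
      cases inf with
      | false =>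
          rw [List.foldl_cons]
          cases hst : PySem.Chars.lstrip l with
          | nil =>
              simp only [pvStepA, hst]
              rw [ih, pvGo_cons_none l ls (pvOpener_nil l hst)]
              simp
          | cons c rest =>
              simp only [pvStepA, hst]
              by_cases hc : c = '`' ∨ c = '~'
              · rw [if_pos hc]
                by_cases hm : 3 ≤ pvRunLen c (c :: rest)
                · rw [if_pos hm, ih,
                    pvGo_cons_some l ls c (pvRunLen c (c :: rest)) (pvOpener_some l c rest hst hc hm)]
                  simp
                · rw [if_neg hm, ih,
                    pvGo_cons_none l ls (pvOpener_none l c rest hst (fun h => hm h.2))]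
                  simp
              · rw [if_neg hc, ih,
                  pvGo_cons_none l ls (pvOpener_none l c rest hst (fun h => hc h.1))]
                simp
      | true =>
          rw [List.foldl_cons]
          simp only [pvStepA, strip_lstrip]
          by_cases hcl : PySem.Chars.strip l ≠ [] ∧ fl ≤ (PySem.Chars.strip l).length ∧
              (PySem.Chars.strip l).all (· == fc)
          · rw [if_pos hcl, ih, pvDropBlock_cons_pos fc fl l ls hcl]
            simp
          · rw [if_neg hcl, ih, pvDropBlock_cons_neg fc fl l ls hcl]
            simp

-- ===== VERDICT =====
theorem strip_fenced_code_blocks_spec : Claim_equal_strip_fenced_code_blocks := by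
  intro text _
  unfold Spec_strip_fenced_code_blocks strip_fenced_code_blocks strip_fenced_code_blocks_alt
  rw [pvFold_eq_go]
  simp
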